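-- pv_equiv track=rewrite | github.com/rohansimha02/AI-Code-Reviewer | scripts/01_extract_bugsinpy.py | extract_code_from_patch
-- ===== SOURCE A (Python) =====
-- from typing import Dict, List, Optional, Tuple
--
-- def extract_code_from_patch(patch_content: str, context_lines: int = 15) -> Optional[str]:
--     """Extract code from patch content."""
--     lines = patch_content.split('\n')
--     code_lines = []
--
--     for line in lines:
--         if line.startswith('@@'):
--             # Parse the @@ line to get line numbers
--             parts = line.split(' ')
--             if len(parts) >= 3:
--                 try:
--                     # Extract line number after the @@
--                     line_info = parts[1]
--                     if line_info.startswith('-'):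
--                         line_info = line_info[1:]
--                     start_line = int(line_info.split(',')[0])
--                     code_lines = []
--                 except (ValueError, IndexError):
--                     continue
--         elif line.startswith('+') or line.startswith('-') or line.startswith(' '):
--             # Add context lines
--             if line.startswith(('+', '-', ' ')):
--                 code_lines.append(line[1:] if line.startswith(('+', '-', ' ')) else line)
--
--     if code_lines:
--         return '\n'.join(code_lines)
--
--     return None
-- ===== SOURCE B (Python) =====
-- def _is_hunk_header(line):
--     """True exactly when A would treat line as a valid @@ hunk header (and reset)."""
--     if not line.startswith('@@'):
--         return False
--     parts = line.split(' ')
--     if len(parts) < 3: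
--         return False
--     info = parts[1]
--     if info.startswith('-'):
--         info = info[1:]
--     try:
--         int(info.split(',')[0])
--     except ValueError:
--         return False
--     return True
--
--
-- def extract_code_from_patch(patch_content: str, context_lines: int = 15):
--     """Extract code from patch content (suffix-after-last-valid-hunk-header formulation)."""
--     lines = patch_content.split('\n')
--     last = -1
--     for i, line in enumerate(lines):
--         if _is_hunk_header(line):
--             last = i
--     code = [line[1:] for line in lines[last + 1:]
--             if line.startswith(('+', '-', ' '))]
--     return '\n'.join(code) if code else None
-- ===== Notes on version B (the rewrite author's own statement) =====
-- stated objective: simpler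
-- what changed: Replaces A's stateful accumulate-and-reset loop by a named is-hunk-header predicate, a scan for the index of the last valid header, and one comprehension over the suffix after it.
import Mathlib
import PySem

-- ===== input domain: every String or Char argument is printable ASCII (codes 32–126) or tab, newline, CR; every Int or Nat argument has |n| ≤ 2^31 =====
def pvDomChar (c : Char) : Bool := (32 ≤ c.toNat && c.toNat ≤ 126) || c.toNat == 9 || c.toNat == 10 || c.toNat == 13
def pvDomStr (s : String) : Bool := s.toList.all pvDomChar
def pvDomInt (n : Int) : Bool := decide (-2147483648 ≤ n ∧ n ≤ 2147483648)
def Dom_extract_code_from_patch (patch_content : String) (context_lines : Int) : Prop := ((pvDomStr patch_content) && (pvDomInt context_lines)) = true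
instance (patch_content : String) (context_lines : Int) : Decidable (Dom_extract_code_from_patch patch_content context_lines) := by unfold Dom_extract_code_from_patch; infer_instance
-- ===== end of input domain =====

-- B replaces A's accumulate-and-reset loop by a named header predicate, a scan for the
-- last valid hunk-header index, and one filter/map over the suffix after it (objective: simpler).


-- ===== PORT A =====
-- s.split(sep) for a nonempty literal sep (Python never raises there; split? is none only for sep = "").
def pvSplit (s sep : String) : List String := (PySem.Str.split? s sep).getD []

-- A's loop body: possibly reset on a '@@' line, else append stripped +/-/space lines.
def pvStepA (code_lines : List String) (line : String) : List String :=
  if PySem.Str.startswith line "@@" then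
    let parts := pvSplit line " "
    if parts.length ≥ 3 then
      let line_info := parts.getD 1 ""
      let line_info := if PySem.Str.startswith line_info "-" then PySem.Str.slice line_info (some 1) none else line_info
      -- try: int(...) succeeds -> reset; except ValueError -> continue (keep code_lines)
      if (PySem.Int.ofStr? ((pvSplit line_info ",").getD 0 "")).isSome then []
      else code_lines
    else code_lines
  else if PySem.Str.startswith line "+" || PySem.Str.startswith line "-" || PySem.Str.startswith line " " then
    code_lines ++ [PySem.Str.slice line (some 1) none]
  else code_lines

def extract_code_from_patch (patch_content : String) (context_lines : Int) : Option String :=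
  let lines := pvSplit patch_content "\n"
  let code_lines := lines.foldl pvStepA []
  if code_lines ≠ [] then some (PySem.Str.join "\n" code_lines) else none

-- ===== PORT B =====
def pvIsHunkHeader (line : String) : Bool :=
  if !(PySem.Str.startswith line "@@") then false
  else
    let parts := pvSplit line " "
    if parts.length < 3 then false
    else
      let info := parts.getD 1 ""
      let info := if PySem.Str.startswith info "-" then PySem.Str.slice info (some 1) none else info
      (PySem.Int.ofStr? ((pvSplit info ",").getD 0 "")).isSome

def extract_code_from_patch_alt (patch_content : String) (context_lines : Int) : Option String :=
  let lines := pvSplit patch_content "\n"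
  let last : Int := (PySem.List.enumerate lines).foldl
    (fun last p => if pvIsHunkHeader p.2 then p.1 else last) (-1)
  let code := (PySem.List.slice lines (some (last + 1)) none).filterMap
    (fun line =>
      if PySem.Str.startswith line "+" || PySem.Str.startswith line "-" || PySem.Str.startswith line " " then
        some (PySem.Str.slice line (some 1) none)
      else none)
  if code ≠ [] then some (PySem.Str.join "\n" code) else none

-- ===== PRECONDITION & SPEC =====
def Spec_extract_code_from_patch (patch_content : String) (context_lines : Int) (out : Option String) : Prop := out = extract_code_from_patch_alt patch_content context_lines
instance (patch_content : String) (context_lines : Int) (out : Option String) : Decidable (Spec_extract_code_from_patch patch_content context_lines out) := by unfold Spec_extract_code_from_patch; infer_instance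

-- ===== CLAIM (what is proved, stated in full; the proofs are below) =====
def Claim_equal_extract_code_from_patch : Prop := ∀ (patch_content : String) (context_lines : Int), Dom_extract_code_from_patch patch_content context_lines → Spec_extract_code_from_patch patch_content context_lines (extract_code_from_patch patch_content context_lines)

-- ===== LEMMAS AND PROOFS =====

def pvCode? (line : String) : Option String :=
  if PySem.Str.startswith line "+" || PySem.Str.startswith line "-" || PySem.Str.startswith line " " then
    some (PySem.Str.slice line (some 1) none)
  else none

def pvLast (lines : List String) : Int :=
  (PySem.List.enumerate lines).foldl (fun last p => if pvIsHunkHeader p.2 then p.1 else last) (-1)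

-- A '@@' line can never enter A's code branch (its first char is '@', not '+'/'-'/' ').
lemma pv_at_not_code (line : String) (h0 : PySem.Str.startswith line "@@" = true) :
    (PySem.Str.startswith line "+" || PySem.Str.startswith line "-" || PySem.Str.startswith line " ") = false := by
  have h1 : ('@'::'@'::[]) <+: line.toList := by
    have := (PySem.Chars.startswith_iff line.toList "@@".toList).mp (by simpa using h0)
    simpa using this
  rcases h1 with ⟨t, ht⟩
  simp only [pysem]
  rw [← ht]
  simp [PySem.Chars.startswith, List.isPrefixOf]

-- A's step as a case split on B's predicate.
lemma pvStepA_eq (acc : List String) (line : String) :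
    pvStepA acc line =
      if pvIsHunkHeader line then []
      else acc ++ (pvCode? line).toList := by
  unfold pvStepA pvIsHunkHeader pvCode?
  by_cases h0 : PySem.Str.startswith line "@@" = true
  · have hnc := pv_at_not_code line h0
    simp only [Bool.or_eq_false_iff] at hnc
    obtain ⟨⟨hp, hm⟩, hs⟩ := hnc
    split_ifs <;> simp_all
  · have h0' : PySem.Chars.startswith line.toList ['@','@'] = false := by
      simpa using h0
    simp only [h0']
    split_ifs <;> first | rfl | simp_all

lemma pvLast_append_singleton (l : List String) (x : String) :
    pvLast (l ++ [x]) = if pvIsHunkHeader x then (l.length : Int) else pvLast l := by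
  unfold pvLast
  rw [PySem.List.enumerate_append, List.foldl_append]
  simp

lemma pvLast_nonneg_add_one (l : List String) : 0 ≤ pvLast l + 1 := by
  induction l using List.reverseRecOn with
  | nil => simp [pvLast, PySem.List.enumerate]
  | append_singleton l x ih =>
    rw [pvLast_append_singleton]
    split_ifs <;> omega

lemma pvLast_le (l : List String) : pvLast l + 1 ≤ (l.length : Int) := by
  induction l using List.reverseRecOn with
  | nil => simp [pvLast, PySem.List.enumerate]
  | append_singleton l x ih =>
    rw [pvLast_append_singleton]
    split_ifs <;> simp <;> omega

-- The main invariant: A's fold equals B's filter over the suffix after the last valid header.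
lemma pvLoop_eq (lines : List String) :
    lines.foldl pvStepA [] =
      (lines.drop (pvLast lines + 1).toNat).filterMap pvCode? := by
  induction lines using List.reverseRecOn with
  | nil => simp [pvLast, PySem.List.enumerate]
  | append_singleton l x ih =>
    rw [List.foldl_append, pvLast_append_singleton]
    simp only [List.foldl_cons, List.foldl_nil, pvStepA_eq]
    by_cases hx : pvIsHunkHeader x
    · have : ((l.length : Int) + 1).toNat = l.length + 1 := by omega
      simp [hx, this]
    · have hnn := pvLast_nonneg_add_one l
      have hle := pvLast_le l
      have hdrop : (l ++ [x]).drop (pvLast l + 1).toNat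
          = l.drop (pvLast l + 1).toNat ++ [x] := by
        rw [List.drop_append_of_le_length (by omega)]
      cases hc : pvCode? x <;> simp [hx, hdrop, ih, List.filterMap_append, hc]

theorem pv_main (patch_content : String) (context_lines : Int) :
    extract_code_from_patch patch_content context_lines
      = extract_code_from_patch_alt patch_content context_lines := by
  have hslice : PySem.List.slice (pvSplit patch_content "\n")
        (some (pvLast (pvSplit patch_content "\n") + 1)) none
      = List.drop (pvLast (pvSplit patch_content "\n") + 1).toNat (pvSplit patch_content "\n") :=
    PySem.List.slice_from _ (pvLast_nonneg_add_one _)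
  show (if List.foldl pvStepA [] (pvSplit patch_content "\n") ≠ [] then
          some (PySem.Str.join "\n" (List.foldl pvStepA [] (pvSplit patch_content "\n"))) else none)
      = (if (PySem.List.slice (pvSplit patch_content "\n")
              (some (pvLast (pvSplit patch_content "\n") + 1)) none).filterMap pvCode? ≠ [] then
          some (PySem.Str.join "\n" ((PySem.List.slice (pvSplit patch_content "\n")
              (some (pvLast (pvSplit patch_content "\n") + 1)) none).filterMap pvCode?)) else none)
  rw [hslice, pvLoop_eq]

-- ===== VERDICT (by name: the statement is the Claim_ definition above) =====
theorem extract_code_from_patch_spec : Claim_equal_extract_code_from_patch := by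
  intro patch_content context_lines _
  unfold Spec_extract_code_from_patch
  exact pv_main patch_content context_lines
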